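-- pv_equiv track=rewrite | github.com/wzygxr/shuati | class054_DynamicProgramming_SubsequenceAndKnapsackProblems/LeetCode712_Minimum_ASCII_Delete_Sum.py | max_ascii_common_subsequence
-- ===== SOURCE A (Python) =====
-- def max_ascii_common_subsequence(s1, s2):
--     """
--     计算两个字符串的最大ASCII公共子序列值和
--
--     Args:
--         s1 (str): 第一个字符串
--         s2 (str): 第二个字符串
--
--     Returns:
--         int: 最大ASCII公共子序列值和
--     """
--     m, n = len(s1), len(s2)
--
--     # dp[i][j] 表示 s1[0..i-1] 和 s2[0..j-1] 的最大ASCII公共子序列值和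
--     dp = [[0] * (n + 1) for _ in range(m + 1)]
--
--     # 填充dp表
--     for i in range(1, m + 1):
--         for j in range(1, n + 1):
--             if s1[i - 1] == s2[j - 1]:
--                 # 字符相同，将ASCII值加到公共子序列值和中
--                 dp[i][j] = dp[i - 1][j - 1] + ord(s1[i - 1])
--             else:
--                 # 字符不同，选择值和较大的情况
--                 dp[i][j] = max(dp[i - 1][j], dp[i][j - 1])
--
--     return dp[m][n]
-- ===== SOURCE B (Python) =====
-- def max_ascii_common_subsequence(s1, s2):
--     # Top-down memoization over prefix pairs, driven by an explicit post-order
--     # DFS stack (no recursion), computing only the subproblems actually reached.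
--     memo = {}
--     stack = [(len(s1), len(s2), False)]
--     while stack:
--         i, j, expanded = stack.pop()
--         if i == 0 or j == 0 or (not expanded and (i, j) in memo):
--             continue
--         if expanded:
--             if s1[i - 1] == s2[j - 1]:
--                 memo[(i, j)] = memo.get((i - 1, j - 1), 0) + ord(s1[i - 1])
--             else:
--                 memo[(i, j)] = max(memo.get((i - 1, j), 0), memo.get((i, j - 1), 0))
--         else:
--             stack.append((i, j, True))
--             if s1[i - 1] == s2[j - 1]:
--                 stack.append((i - 1, j - 1, False))
--             else:
--                 stack.append((i, j - 1, False))
--                 stack.append((i - 1, j, False))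
--     return memo.get((len(s1), len(s2)), 0)
-- ===== Notes on version B (the rewrite author's own statement) =====
-- stated objective: alternative
-- what changed: Replaces A's bottom-up filling of the whole (m+1)x(n+1) DP table by nested index loops with top-down memoization: a post-order DFS over prefix pairs driven by an explicit stack and a dict memo, computing only the subproblems the recurrence actually reaches.
import Mathlib
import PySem

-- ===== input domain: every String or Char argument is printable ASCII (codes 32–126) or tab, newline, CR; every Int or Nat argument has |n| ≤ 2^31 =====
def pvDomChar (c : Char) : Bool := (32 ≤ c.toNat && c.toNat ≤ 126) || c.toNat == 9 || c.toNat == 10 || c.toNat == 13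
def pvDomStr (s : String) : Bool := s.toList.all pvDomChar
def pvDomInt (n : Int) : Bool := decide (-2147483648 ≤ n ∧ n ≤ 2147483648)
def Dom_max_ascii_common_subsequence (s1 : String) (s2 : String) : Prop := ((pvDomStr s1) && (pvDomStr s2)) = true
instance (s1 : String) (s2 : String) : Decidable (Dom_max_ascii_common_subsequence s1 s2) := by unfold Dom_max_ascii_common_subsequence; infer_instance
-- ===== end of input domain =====

-- B replaces A's bottom-up filling of the whole (m+1)×(n+1) DP table with top-down
-- memoization: an explicit-stack post-order DFS over prefix pairs with a dict memo,
-- computing only the subproblems the recurrence reaches; same return value.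

-- ===== PORT A =====
-- A-side helpers: 2-D table read (dp[i][j]) and write (dp[i][j] = v)
def pvGet2 (dp : List (List Int)) (i j : Nat) : Int := (dp.getD i []).getD j 0
def pvSet2 (dp : List (List Int)) (i j : Nat) (v : Int) : List (List Int) :=
  dp.set i ((dp.getD i []).set j v)

-- the body of A's inner loop (loop variable j), and the inner loop itself (one row i)
def pvStepA (cs1 cs2 : List Char) (i : Nat) (dp : List (List Int)) (j : Nat) : List (List Int) :=
  if cs1.getD (i - 1) ' ' == cs2.getD (j - 1) ' ' then
    pvSet2 dp i j (pvGet2 dp (i - 1) (j - 1) + ((cs1.getD (i - 1) ' ').toNat : Int))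
  else
    pvSet2 dp i j (max (pvGet2 dp (i - 1) j) (pvGet2 dp i (j - 1)))

def pvRowA (cs1 cs2 : List Char) (dp : List (List Int)) (i : Nat) : List (List Int) :=
  (List.range' 1 cs2.length).foldl (pvStepA cs1 cs2 i) dp

def max_ascii_common_subsequence (s1 : String) (s2 : String) : Int :=
  let cs1 := s1.toList
  let cs2 := s2.toList
  let m := cs1.length
  let n := cs2.length
  let dp0 : List (List Int) := List.replicate (m + 1) (List.replicate (n + 1) 0)
  let dp := (List.range' 1 m).foldl (pvRowA cs1 cs2) dp0
  pvGet2 dp m n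

-- ===== PORT B =====
-- B-side helper: memo.get((i, j), 0)
def pvVal (memo : PySem.Dict (Nat × Nat) Int) (i j : Nat) : Int := memo.getD (i, j) 0

-- B's while loop over the explicit DFS stack; the fuel argument only makes the loop a
-- total Lean function (lemma pvRun below shows 1 + 4*m*n fuel is never exhausted)
def pvLoopB (cs1 cs2 : List Char) : Nat → List (Nat × Nat × Bool) → PySem.Dict (Nat × Nat) Int → PySem.Dict (Nat × Nat) Int
  | 0, _, memo => memo
  | _ + 1, [], memo => memo
  | f + 1, (i, j, exp) :: st, memo =>
    if i = 0 ∨ j = 0 ∨ (exp = false ∧ (memo.get? (i, j)).isSome = true) then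
      pvLoopB cs1 cs2 f st memo
    else if exp = true then
      pvLoopB cs1 cs2 f st (memo.insert (i, j)
        (if cs1.getD (i - 1) ' ' == cs2.getD (j - 1) ' ' then
          pvVal memo (i - 1) (j - 1) + ((cs1.getD (i - 1) ' ').toNat : Int)
        else max (pvVal memo (i - 1) j) (pvVal memo i (j - 1))))
    else if cs1.getD (i - 1) ' ' == cs2.getD (j - 1) ' ' then
      pvLoopB cs1 cs2 f ((i - 1, j - 1, false) :: (i, j, true) :: st) memo
    else
      pvLoopB cs1 cs2 f ((i - 1, j, false) :: (i, j - 1, false) :: (i, j, true) :: st) memo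

def max_ascii_common_subsequence_alt (s1 : String) (s2 : String) : Int :=
  let cs1 := s1.toList
  let cs2 := s2.toList
  let m := cs1.length
  let n := cs2.length
  pvVal (pvLoopB cs1 cs2 (1 + 4 * m * n) [(m, n, false)] PySem.Dict.empty) m n

-- ===== PRECONDITION & SPEC =====
def Spec_max_ascii_common_subsequence (s1 : String) (s2 : String) (out : Int) : Prop := out = max_ascii_common_subsequence_alt s1 s2
instance (s1 : String) (s2 : String) (out : Int) : Decidable (Spec_max_ascii_common_subsequence s1 s2 out) := by unfold Spec_max_ascii_common_subsequence; infer_instance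

-- ===== CLAIM (what is proved, stated in full; the proofs are below) =====
def Claim_equal_max_ascii_common_subsequence : Prop := ∀ (s1 : String) (s2 : String), Dom_max_ascii_common_subsequence s1 s2 → Spec_max_ascii_common_subsequence s1 s2 (max_ascii_common_subsequence s1 s2)

-- ===== LEMMAS AND PROOFS =====

-- the mathematical recurrence both programs compute: value at prefix pair (i, j)
def pvF (cs1 cs2 : List Char) : Nat → Nat → Int
  | 0, _ => 0
  | _ + 1, 0 => 0
  | i + 1, j + 1 =>
    if cs1.getD i ' ' == cs2.getD j ' ' then
      pvF cs1 cs2 i j + ((cs1.getD i ' ').toNat : Int)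
    else
      max (pvF cs1 cs2 i (j + 1)) (pvF cs1 cs2 (i + 1) j)
  termination_by i j => (i, j)

lemma pvF_zero_left (cs1 cs2 : List Char) (j : Nat) : pvF cs1 cs2 0 j = 0 := by
  cases j <;> simp [pvF]

lemma pvF_zero_right (cs1 cs2 : List Char) (i : Nat) : pvF cs1 cs2 i 0 = 0 := by
  cases i <;> simp [pvF]

lemma pvF_succ_succ (cs1 cs2 : List Char) (i j : Nat) :
    pvF cs1 cs2 (i + 1) (j + 1) =
      if cs1.getD i ' ' == cs2.getD j ' ' then
        pvF cs1 cs2 i j + ((cs1.getD i ' ').toNat : Int)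
      else
        max (pvF cs1 cs2 i (j + 1)) (pvF cs1 cs2 (i + 1) j) := by
  simp [pvF]

-- ---------- A-side: table invariant ----------

-- after A has filled rows < i fully and row i up to column j, the table reads pvF there and 0 elsewhere
def pvInvA (cs1 cs2 : List Char) (dp : List (List Int)) (i j : Nat) : Prop :=
  dp.length = cs1.length + 1 ∧
  (∀ r, r < dp.length → (dp.getD r []).length = cs2.length + 1) ∧
  ∀ i' j', i' ≤ cs1.length → j' ≤ cs2.length →
    pvGet2 dp i' j' = if i' < i ∨ (i' = i ∧ j' ≤ j) then pvF cs1 cs2 i' j' else 0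

lemma pvSet2_length (dp : List (List Int)) (i j : Nat) (v : Int) :
    (pvSet2 dp i j v).length = dp.length := by simp [pvSet2]

lemma pvSet2_getD_row (dp : List (List Int)) (i j : Nat) (v : Int) (r : Nat) :
    (pvSet2 dp i j v).getD r [] =
      if r = i ∧ i < dp.length then (dp.getD i []).set j v else dp.getD r [] := by
  unfold pvSet2
  by_cases h : r = i ∧ i < dp.length
  · obtain ⟨rfl, hlt⟩ := h
    simp [List.getD_eq_getElem?_getD, hlt]
  · simp only [List.getD_eq_getElem?_getD]
    rcases Decidable.em (r = i) with rfl | hne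
    · have hge : dp.length ≤ r := by
        by_contra hc; exact h ⟨rfl, by omega⟩
      rw [if_neg h]
      rw [List.getElem?_eq_none (by simpa using hge), List.getElem?_eq_none (by simpa using hge)]
    · rw [if_neg h, List.getElem?_set_ne (by omega)]

lemma pvGet2_set2 (dp : List (List Int)) (i j : Nat) (v : Int) (i' j' : Nat)
    (hi : i < dp.length) (hj : j < (dp.getD i []).length) :
    pvGet2 (pvSet2 dp i j v) i' j' = if i' = i ∧ j' = j then v else pvGet2 dp i' j' := by
  unfold pvGet2
  rw [pvSet2_getD_row]
  by_cases hii : i' = i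
  · subst hii
    rw [if_pos ⟨rfl, hi⟩]
    by_cases hjj : j' = j
    · subst hjj
      rw [if_pos ⟨rfl, rfl⟩]
      simp only [List.getD_eq_getElem?_getD] at hj ⊢
      simp [hj]
    · rw [if_neg (by tauto)]
      simp [List.getD_eq_getElem?_getD, List.getElem?_set_ne (by omega : j ≠ j')]
  · rw [if_neg (by tauto), if_neg (by tauto)]

lemma pvStepA_inv (cs1 cs2 : List Char) (i j : Nat) (dp : List (List Int))
    (hi1 : 1 ≤ i) (him : i ≤ cs1.length) (hj : j < cs2.length)
    (h : pvInvA cs1 cs2 dp i j) :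
    pvInvA cs1 cs2 (pvStepA cs1 cs2 i dp (j + 1)) i (j + 1) := by
  obtain ⟨hlen, hrows, hval⟩ := h
  have hidp : i < dp.length := by omega
  have hjrow : j + 1 < (dp.getD i []).length := by rw [hrows i hidp]; omega
  have hieq : i - 1 + 1 = i := by omega
  have hr1 : pvGet2 dp (i - 1) j = pvF cs1 cs2 (i - 1) j := by
    rw [hval (i - 1) j (by omega) (by omega)]; rw [if_pos (by omega)]
  have hr2 : pvGet2 dp (i - 1) (j + 1) = pvF cs1 cs2 (i - 1) (j + 1) := by
    rw [hval (i - 1) (j + 1) (by omega) (by omega)]; rw [if_pos (by omega)]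
  have hr3 : pvGet2 dp i j = pvF cs1 cs2 i j := by
    rw [hval i j (by omega) (by omega)]; rw [if_pos (by omega)]
  have hF : pvF cs1 cs2 i (j + 1) =
      if cs1.getD (i - 1) ' ' == cs2.getD j ' ' then
        pvF cs1 cs2 (i - 1) j + ((cs1.getD (i - 1) ' ').toNat : Int)
      else
        max (pvF cs1 cs2 (i - 1) (j + 1)) (pvF cs1 cs2 i j) := by
    conv_lhs => rw [← hieq]
    rw [pvF_succ_succ, hieq]
  -- the written value equals pvF i (j+1) in either branch
  have hstep : pvStepA cs1 cs2 i dp (j + 1) = pvSet2 dp i (j + 1) (pvF cs1 cs2 i (j + 1)) := by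
    unfold pvStepA
    simp only [Nat.add_sub_cancel]
    by_cases hc : cs1.getD (i - 1) ' ' == cs2.getD j ' '
    · rw [if_pos hc, hF, if_pos hc, hr1]
    · rw [if_neg hc, hF, if_neg hc, hr2, hr3]
  rw [hstep]
  refine ⟨by rw [pvSet2_length]; exact hlen, ?_, ?_⟩
  · intro r hr
    rw [pvSet2_getD_row]
    by_cases hcase : r = i ∧ i < dp.length
    · rw [if_pos hcase, List.length_set, hrows i hidp]
    · rw [if_neg hcase]; exact hrows r (by rwa [pvSet2_length] at hr)
  · intro i' j' hi' hj'
    rw [pvGet2_set2 dp i (j + 1) _ i' j' hidp hjrow]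
    by_cases hc : i' = i ∧ j' = j + 1
    · obtain ⟨rfl, rfl⟩ := hc
      rw [if_pos ⟨rfl, rfl⟩, if_pos (by omega)]
    · rw [if_neg hc, hval i' j' hi' hj']
      by_cases h1 : i' < i ∨ (i' = i ∧ j' ≤ j)
      · rw [if_pos h1, if_pos (by omega)]
      · rw [if_neg h1, if_neg (by omega)]

lemma pvInnerA (cs1 cs2 : List Char) (i : Nat) (hi1 : 1 ≤ i) (him : i ≤ cs1.length) :
    ∀ (cnt j : Nat) (dp : List (List Int)), j + cnt = cs2.length → pvInvA cs1 cs2 dp i j →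
    pvInvA cs1 cs2 ((List.range' (j + 1) cnt).foldl (pvStepA cs1 cs2 i) dp) i cs2.length := by
  intro cnt
  induction cnt with
  | zero => intro j dp hjn h; simpa [show j = cs2.length by omega] using h
  | succ cnt ih =>
    intro j dp hjn h
    rw [List.range'_succ, List.foldl_cons]
    have h' := pvStepA_inv cs1 cs2 i j dp hi1 him (by omega) h
    have := ih (j + 1) (pvStepA cs1 cs2 i dp (j + 1)) (by omega) h'
    simpa using this

lemma pvInvA_next_row (cs1 cs2 : List Char) (dp : List (List Int)) (i : Nat)
    (h : pvInvA cs1 cs2 dp i cs2.length) : pvInvA cs1 cs2 dp (i + 1) 0 := by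
  obtain ⟨hlen, hrows, hval⟩ := h
  refine ⟨hlen, hrows, ?_⟩
  intro i' j' hi' hj'
  rw [hval i' j' hi' hj']
  by_cases h1 : i' < i ∨ (i' = i ∧ j' ≤ cs2.length)
  · rw [if_pos h1, if_pos (by omega)]
  · by_cases h2 : i' < i + 1 ∨ (i' = i + 1 ∧ j' ≤ 0)
    · rw [if_neg h1, if_pos h2]
      have : i' = i + 1 ∧ j' = 0 := by omega
      rw [this.2, pvF_zero_right]
    · rw [if_neg h1, if_neg h2]

lemma pvOuterA (cs1 cs2 : List Char) :
    ∀ (cnt i : Nat) (dp : List (List Int)), i + cnt = cs1.length →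
    pvInvA cs1 cs2 dp i cs2.length →
    pvInvA cs1 cs2 ((List.range' (i + 1) cnt).foldl (pvRowA cs1 cs2) dp) cs1.length cs2.length := by
  intro cnt
  induction cnt with
  | zero => intro i dp him h; simpa [show i = cs1.length by omega] using h
  | succ cnt ih =>
    intro i dp him h
    rw [List.range'_succ, List.foldl_cons]
    have h0 : pvInvA cs1 cs2 dp (i + 1) 0 := pvInvA_next_row cs1 cs2 dp i h
    have hrow : pvInvA cs1 cs2 (pvRowA cs1 cs2 dp (i + 1)) (i + 1) cs2.length := by
      have := pvInnerA cs1 cs2 (i + 1) (by omega) (by omega) cs2.length 0 dp (by omega) h0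
      simpa [pvRowA] using this
    have := ih (i + 1) (pvRowA cs1 cs2 dp (i + 1)) (by omega) hrow
    simpa using this

lemma pvInvA_init (cs1 cs2 : List Char) :
    pvInvA cs1 cs2 (List.replicate (cs1.length + 1) (List.replicate (cs2.length + 1) 0)) 0 cs2.length := by
  refine ⟨by simp, ?_, ?_⟩
  · intro r hr
    simp only [List.length_replicate] at hr
    rw [List.getD_eq_getElem?_getD, List.getElem?_replicate_of_lt hr]
    simp
  · intro i' j' hi' hj'
    have hget : pvGet2 (List.replicate (cs1.length + 1) (List.replicate (cs2.length + 1) 0)) i' j' = 0 := by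
      unfold pvGet2
      rw [List.getD_eq_getElem?_getD, List.getD_eq_getElem?_getD,
          List.getElem?_replicate_of_lt (show i' < cs1.length + 1 by omega)]
      simp [List.getElem?_replicate_of_lt (show j' < cs2.length + 1 by omega)]
    rw [hget]
    by_cases h1 : i' < 0 ∨ (i' = 0 ∧ j' ≤ cs2.length)
    · rw [if_pos h1]
      have : i' = 0 := by omega
      rw [this, pvF_zero_left]
    · rw [if_neg h1]

lemma pvA_eq (s1 s2 : String) :
    max_ascii_common_subsequence s1 s2 = pvF s1.toList s2.toList s1.toList.length s2.toList.length := by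
  have h := pvOuterA s1.toList s2.toList s1.toList.length 0
    (List.replicate (s1.toList.length + 1) (List.replicate (s2.toList.length + 1) 0))
    (Nat.zero_add _) (pvInvA_init s1.toList s2.toList)
  obtain ⟨hlen, hrows, hval⟩ := h
  have hval' := hval s1.toList.length s2.toList.length (le_refl _) (le_refl _)
  rw [if_pos (by omega : s1.toList.length < s1.toList.length ∨
      (s1.toList.length = s1.toList.length ∧ s2.toList.length ≤ s2.toList.length))] at hval'
  exact hval'

-- ---------- B-side: DFS/memo invariant ----------

-- the memo is coherent: unique keys, every key in [1..]×[1..], every value is pvF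
def pvCoh (cs1 cs2 : List Char) (memo : PySem.Dict (Nat × Nat) Int) : Prop :=
  memo.keys.Nodup ∧
  (∀ a b, (memo.get? (a, b)).isSome = true → 1 ≤ a ∧ 1 ≤ b) ∧
  (∀ a b v, memo.get? (a, b) = some v → v = pvF cs1 cs2 a b)

-- memo.get((a,b), 0) reads pvF a b wherever (a,b) is covered (a base pair or memoized)
lemma pvVal_eq (cs1 cs2 : List Char) (memo : PySem.Dict (Nat × Nat) Int)
    (h : pvCoh cs1 cs2 memo) (a b : Nat)
    (hc : a = 0 ∨ b = 0 ∨ (memo.get? (a, b)).isSome = true) :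
    pvVal memo a b = pvF cs1 cs2 a b := by
  unfold pvVal
  rw [PySem.Dict.getD_eq_get?_getD]
  cases hg : memo.get? (a, b) with
  | some v => exact (h.2.2 a b v hg)
  | none =>
    have : a = 0 ∨ b = 0 := by
      rcases hc with h0 | h0 | h0
      · exact Or.inl h0
      · exact Or.inr h0
      · rw [hg] at h0; simp at h0
    rcases this with rfl | rfl
    · simp [pvF_zero_left]
    · simp [pvF_zero_right]

lemma pvLoopB_nil (cs1 cs2 : List Char) (f : Nat) (memo : PySem.Dict (Nat × Nat) Int) :
    pvLoopB cs1 cs2 f [] memo = memo := by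
  cases f <;> rfl

lemma pvLoopB_cons (cs1 cs2 : List Char) (f i j : Nat) (exp : Bool)
    (st : List (Nat × Nat × Bool)) (memo : PySem.Dict (Nat × Nat) Int) :
    pvLoopB cs1 cs2 (f + 1) ((i, j, exp) :: st) memo =
      if i = 0 ∨ j = 0 ∨ (exp = false ∧ (memo.get? (i, j)).isSome = true) then
        pvLoopB cs1 cs2 f st memo
      else if exp = true then
        pvLoopB cs1 cs2 f st (memo.insert (i, j)
          (if cs1.getD (i - 1) ' ' == cs2.getD (j - 1) ' ' then
            pvVal memo (i - 1) (j - 1) + ((cs1.getD (i - 1) ' ').toNat : Int)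
          else max (pvVal memo (i - 1) j) (pvVal memo i (j - 1))))
      else if cs1.getD (i - 1) ' ' == cs2.getD (j - 1) ' ' then
        pvLoopB cs1 cs2 f ((i - 1, j - 1, false) :: (i, j, true) :: st) memo
      else
        pvLoopB cs1 cs2 f ((i - 1, j, false) :: (i, j - 1, false) :: (i, j, true) :: st) memo := rfl

-- what pvRun concludes about processing one unexpanded frame (i, j, false)
def pvRunOut (cs1 cs2 : List Char) (i j : Nat) (memo : PySem.Dict (Nat × Nat) Int)
    (c : Nat) (memo' : PySem.Dict (Nat × Nat) Int) : Prop :=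
  (∀ f st, pvLoopB cs1 cs2 (f + c) ((i, j, false) :: st) memo = pvLoopB cs1 cs2 f st memo') ∧
  pvCoh cs1 cs2 memo' ∧
  (∀ a b, (memo.get? (a, b)).isSome = true → (memo'.get? (a, b)).isSome = true) ∧
  (∀ a b, (memo'.get? (a, b)).isSome = true → (memo.get? (a, b)).isSome = true ∨ (a ≤ i ∧ b ≤ j)) ∧
  (i = 0 ∨ j = 0 ∨ (memo'.get? (i, j)).isSome = true) ∧
  c + 4 * memo.size ≤ 1 + 4 * memo'.size

-- the skipped-frame case (base pair or already memoized): one pop, memo unchanged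
lemma pvRunSkip (cs1 cs2 : List Char) (i j : Nat) (memo : PySem.Dict (Nat × Nat) Int)
    (hcoh : pvCoh cs1 cs2 memo)
    (hskip : i = 0 ∨ j = 0 ∨ (memo.get? (i, j)).isSome = true) :
    ∃ c memo', pvRunOut cs1 cs2 i j memo c memo' := by
  refine ⟨1, memo, ?_, hcoh, fun a b h => h, fun a b h => Or.inl h, hskip, by omega⟩
  intro f st
  rw [pvLoopB_cons, if_pos (by tauto)]

-- DFS correctness: processing the frame (i, j, false) on top of any stack, from any
-- coherent memo, consumes some fuel c, yields a coherent memo covering (i, j), adds only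
-- keys in the box [1..i]x[1..j], and satisfies the accounting c + 4|memo| <= 1 + 4|memo'|.
lemma pvRun (cs1 cs2 : List Char) :
    ∀ (k : Nat), ∀ (i j : Nat), i + j ≤ k →
    ∀ memo, pvCoh cs1 cs2 memo →
    ∃ c memo', pvRunOut cs1 cs2 i j memo c memo' := by
  intro k
  induction k with
  | zero =>
    intro i j hk memo hcoh
    exact pvRunSkip cs1 cs2 i j memo hcoh (Or.inl (by omega))
  | succ k ih =>
    intro i j hk memo hcoh
    by_cases hskip : i = 0 ∨ j = 0 ∨ (memo.get? (i, j)).isSome = true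
    · exact pvRunSkip cs1 cs2 i j memo hcoh hskip
    · push Not at hskip
      obtain ⟨hi, hj, hsome⟩ := hskip
      have hnone : memo.get? (i, j) = none := by
        cases hg : memo.get? (i, j) with
        | none => rfl
        | some v => rw [hg] at hsome; simp at hsome
      have hi1 : i - 1 + 1 = i := by omega
      have hj1 : j - 1 + 1 = j := by omega
      have hF : pvF cs1 cs2 i j =
          if cs1.getD (i - 1) ' ' == cs2.getD (j - 1) ' ' then
            pvF cs1 cs2 (i - 1) (j - 1) + ((cs1.getD (i - 1) ' ').toNat : Int)
          else
            max (pvF cs1 cs2 (i - 1) j) (pvF cs1 cs2 i (j - 1)) := by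
        conv_lhs => rw [← hi1, ← hj1]
        rw [pvF_succ_succ, hi1, hj1]
      by_cases hm : (cs1.getD (i - 1) ' ' == cs2.getD (j - 1) ' ') = true
      · -- match: one child (i-1, j-1)
        obtain ⟨c1, memo1, hstep1, hcoh1, hmono1, hbox1, hcov1, hcard1⟩ :=
          ih (i - 1) (j - 1) (by omega) memo hcoh
        have hins : ∀ a b, ((memo1.insert (i, j) (pvF cs1 cs2 i j)).get? (a, b)) =
            if (a, b) = (i, j) then some (pvF cs1 cs2 i j) else memo1.get? (a, b) :=
          fun a b => PySem.Dict.get?_insert memo1 (i, j) (a, b) (pvF cs1 cs2 i j)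
        have hnotin1 : (memo1.get? (i, j)).isSome ≠ true := by
          intro h
          rcases hbox1 i j h with h' | ⟨h1, h2⟩
          · rw [hnone] at h'; simp at h'
          · omega
        have hsz : (memo1.insert (i, j) (pvF cs1 cs2 i j)).size = memo1.size + 1 := by
          rw [PySem.Dict.size_insert, if_neg]
          rw [PySem.Dict.contains_eq_isSome_get?]
          exact hnotin1
        have hVal : pvVal memo1 (i - 1) (j - 1) = pvF cs1 cs2 (i - 1) (j - 1) :=
          pvVal_eq cs1 cs2 memo1 hcoh1 (i - 1) (j - 1) hcov1
        refine ⟨c1 + 2, memo1.insert (i, j) (pvF cs1 cs2 i j), ?_, ?_, ?_, ?_, ?_, by omega⟩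
        · intro f st
          have e1 : f + (c1 + 2) = ((f + 1) + c1) + 1 := by omega
          rw [e1, pvLoopB_cons, if_neg (by simp [hi, hj, hnone]), if_neg (by simp), if_pos hm,
              hstep1 (f + 1) ((i, j, true) :: st), pvLoopB_cons,
              if_neg (by simp [hi, hj]), if_pos rfl, if_pos hm]
          rw [show pvVal memo1 (i - 1) (j - 1) + ((cs1.getD (i - 1) ' ').toNat : Int) =
              pvF cs1 cs2 i j by rw [hVal, hF, if_pos hm]]
        · refine ⟨PySem.Dict.nodup_keys_insert _ _ _ hcoh1.1, ?_, ?_⟩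
          · intro a b h
            rw [hins] at h
            split at h
            · rename_i heq
              obtain ⟨rfl, rfl⟩ := Prod.mk.injEq .. ▸ heq
              omega
            · exact hcoh1.2.1 a b h
          · intro a b v hv
            rw [hins] at hv
            split at hv
            · rename_i heq
              obtain ⟨rfl, rfl⟩ := Prod.mk.injEq .. ▸ heq
              exact (Option.some.injEq .. ▸ hv).symm
            · exact hcoh1.2.2 a b v hv
        · intro a b h
          rw [hins]
          split
          · rfl
          · exact hmono1 a b h
        · intro a b h
          rw [hins] at h
          split at h
          · rename_i heq
            obtain ⟨rfl, rfl⟩ := Prod.mk.injEq .. ▸ heq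
            exact Or.inr ⟨le_refl _, le_refl _⟩
          · rcases hbox1 a b h with h' | ⟨h1, h2⟩
            · exact Or.inl h'
            · exact Or.inr ⟨by omega, by omega⟩
        · refine Or.inr (Or.inr ?_)
          rw [hins, if_pos rfl]
          rfl
      · -- mismatch: two children (i-1, j) and (i, j-1)
        obtain ⟨c1, memo1, hstep1, hcoh1, hmono1, hbox1, hcov1, hcard1⟩ :=
          ih (i - 1) j (by omega) memo hcoh
        obtain ⟨c2, memo2, hstep2, hcoh2, hmono2, hbox2, hcov2, hcard2⟩ :=
          ih i (j - 1) (by omega) memo1 hcoh1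
        have hins : ∀ a b, ((memo2.insert (i, j) (pvF cs1 cs2 i j)).get? (a, b)) =
            if (a, b) = (i, j) then some (pvF cs1 cs2 i j) else memo2.get? (a, b) :=
          fun a b => PySem.Dict.get?_insert memo2 (i, j) (a, b) (pvF cs1 cs2 i j)
        have hnotin2 : (memo2.get? (i, j)).isSome ≠ true := by
          intro h
          rcases hbox2 i j h with h' | ⟨h1, h2⟩
          · rcases hbox1 i j h' with h'' | ⟨h1, h2⟩
            · rw [hnone] at h''; simp at h''
            · omega
          · omega
        have hsz : (memo2.insert (i, j) (pvF cs1 cs2 i j)).size = memo2.size + 1 := by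
          rw [PySem.Dict.size_insert, if_neg]
          rw [PySem.Dict.contains_eq_isSome_get?]
          exact hnotin2
        have hVal1 : pvVal memo2 (i - 1) j = pvF cs1 cs2 (i - 1) j := by
          refine pvVal_eq cs1 cs2 memo2 hcoh2 (i - 1) j ?_
          rcases hcov1 with h' | h' | h'
          · exact Or.inl h'
          · omega
          · exact Or.inr (Or.inr (hmono2 _ _ h'))
        have hVal2 : pvVal memo2 i (j - 1) = pvF cs1 cs2 i (j - 1) :=
          pvVal_eq cs1 cs2 memo2 hcoh2 i (j - 1) hcov2
        refine ⟨c1 + c2 + 2, memo2.insert (i, j) (pvF cs1 cs2 i j), ?_, ?_, ?_, ?_, ?_, by omega⟩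
        · intro f st
          have e1 : f + (c1 + c2 + 2) = ((((f + 1) + c2) + c1) + 1) := by omega
          rw [e1, pvLoopB_cons, if_neg (by simp [hi, hj, hnone]), if_neg (by simp), if_neg hm,
              hstep1 ((f + 1) + c2) ((i, j - 1, false) :: (i, j, true) :: st),
              hstep2 (f + 1) ((i, j, true) :: st), pvLoopB_cons,
              if_neg (by simp [hi, hj]), if_pos rfl, if_neg hm]
          rw [show max (pvVal memo2 (i - 1) j) (pvVal memo2 i (j - 1)) = pvF cs1 cs2 i j by
            rw [hVal1, hVal2, hF, if_neg hm]]
        · refine ⟨PySem.Dict.nodup_keys_insert _ _ _ hcoh2.1, ?_, ?_⟩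
          · intro a b h
            rw [hins] at h
            split at h
            · rename_i heq
              obtain ⟨rfl, rfl⟩ := Prod.mk.injEq .. ▸ heq
              omega
            · exact hcoh2.2.1 a b h
          · intro a b v hv
            rw [hins] at hv
            split at hv
            · rename_i heq
              obtain ⟨rfl, rfl⟩ := Prod.mk.injEq .. ▸ heq
              exact (Option.some.injEq .. ▸ hv).symm
            · exact hcoh2.2.2 a b v hv
        · intro a b h
          rw [hins]
          split
          · rfl
          · exact hmono2 a b (hmono1 a b h)
        · intro a b h
          rw [hins] at h
          split at h
          · rename_i heq
            obtain ⟨rfl, rfl⟩ := Prod.mk.injEq .. ▸ heq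
            exact Or.inr ⟨le_refl _, le_refl _⟩
          · rcases hbox2 a b h with h' | ⟨h1, h2⟩
            · rcases hbox1 a b h' with h'' | ⟨h1, h2⟩
              · exact Or.inl h''
              · exact Or.inr ⟨by omega, by omega⟩
            · exact Or.inr ⟨by omega, by omega⟩
        · refine Or.inr (Or.inr ?_)
          rw [hins, if_pos rfl]
          rfl

-- the final read: B's loop from the empty memo computes pvF m n
lemma pvB_list (cs1 cs2 : List Char) :
    pvVal (pvLoopB cs1 cs2 (1 + 4 * cs1.length * cs2.length)
        [(cs1.length, cs2.length, false)] PySem.Dict.empty) cs1.length cs2.length =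
      pvF cs1 cs2 cs1.length cs2.length := by
  have hcoh0 : pvCoh cs1 cs2 PySem.Dict.empty := by
    refine ⟨PySem.Dict.nodup_keys_empty, ?_, ?_⟩
    · intro a b h
      rw [PySem.Dict.get?_empty] at h
      simp at h
    · intro a b v h
      rw [PySem.Dict.get?_empty] at h
      simp at h
  obtain ⟨c, memo', hstep, hcoh', hmono, hbox, hcov, hcard⟩ :=
    pvRun cs1 cs2 (cs1.length + cs2.length) cs1.length cs2.length (le_refl _)
      PySem.Dict.empty hcoh0
  -- |memo'| ≤ m*n: its keys are distinct pairs in [1..m]×[1..n]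
  have hkeylen : memo'.keys.length = memo'.size := by
    simp [PySem.Dict.keys, PySem.Dict.size]
  have hsub : memo'.keys.toFinset ⊆ (Finset.Icc 1 cs1.length) ×ˢ (Finset.Icc 1 cs2.length) := by
    intro p hp
    rw [List.mem_toFinset] at hp
    have hsome : (memo'.get? p).isSome = true := by
      cases hg : memo'.get? p with
      | none => exact absurd ((PySem.Dict.get?_eq_none_iff_not_mem_keys memo' p).mp hg) (by simp [hp])
      | some v => rfl
    obtain ⟨a, b⟩ := p
    have h1 := hcoh'.2.1 a b hsome
    have h2 := hbox a b hsome
    rcases h2 with h2 | ⟨h2, h3⟩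
    · rw [PySem.Dict.get?_empty] at h2; simp at h2
    · simp only [Finset.mem_product, Finset.mem_Icc]
      exact ⟨⟨h1.1, h2⟩, ⟨h1.2, h3⟩⟩
  have hcardle : memo'.size ≤ cs1.length * cs2.length := by
    have h1 : memo'.keys.toFinset.card = memo'.keys.length :=
      List.toFinset_card_of_nodup hcoh'.1
    have h2 := Finset.card_le_card hsub
    rw [Finset.card_product, Nat.card_Icc, Nat.card_Icc, Nat.add_sub_cancel,
        Nat.add_sub_cancel] at h2
    omega
  have hc : c ≤ 1 + 4 * cs1.length * cs2.length := by
    rw [PySem.Dict.size_empty] at hcard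
    rw [Nat.mul_assoc]
    omega
  have e : 1 + 4 * cs1.length * cs2.length = (1 + 4 * cs1.length * cs2.length - c) + c := by omega
  rw [e, hstep (1 + 4 * cs1.length * cs2.length - c) [], pvLoopB_nil]
  exact pvVal_eq cs1 cs2 memo' hcoh' cs1.length cs2.length hcov

lemma pvB_eq (s1 s2 : String) :
    max_ascii_common_subsequence_alt s1 s2 = pvF s1.toList s2.toList s1.toList.length s2.toList.length := by
  exact pvB_list s1.toList s2.toList

-- ===== VERDICT (by name: the statement is the Claim_ definition above) =====
theorem max_ascii_common_subsequence_spec : Claim_equal_max_ascii_common_subsequence := by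
  intro s1 s2 _
  unfold Spec_max_ascii_common_subsequence
  rw [pvA_eq, pvB_eq]
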